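-- pv_equiv track=rewrite | github.com/pokerdio/generic | e/e-112.py | bouncy_break
-- ===== SOURCE A (Python) =====
-- def bouncy_break(n):
--     s = str(n)
--     ndigits = len(s)
--     clast = s[0]
--     klast = -1  # last place digits differ on the first up or down leg
--
--     k = 1
--     direction = 0
--     for c in s[1:]:
--         if direction == 1:
--             if c < clast:
--                 break
--             if c > clast:
--                 klast = k
--         elif direction == -1:
--             if c > clast:
--                 break
--             if c < clast:
--                 klast = k
--         else:
--             if c > clast:
--                 direction = 1
--                 klast = k
--             if c < clast:
--                 direction = -1
--                 klast = k
--
--         clast = c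
--         k += 1
--
--     return klast, direction, s
-- ===== SOURCE B (Python) =====
-- def first_nonzero(d):
--     for x in d:
--         if x:
--             return x
--     return 0
--
--
-- def first_index(d, t):
--     for i, x in enumerate(d):
--         if x == t:
--             return i
--     return len(d)
--
--
-- def last_match_index(prefix, t, start):
--     klast = -1
--     for i, x in enumerate(prefix, start):
--         if x == t:
--             klast = i
--     return klast
--
--
-- def bouncy_break(n):
--     s = str(n)
--     d = [(b > a) - (b < a) for a, b in zip(s, s[1:])]
--     direction = first_nonzero(d)
--     stop = first_index(d, -direction) if direction else 0
--     klast = last_match_index(d[:stop], direction, 1)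
--     return klast, direction, s
-- ===== Notes on version B (the rewrite author's own statement) =====
-- stated objective: alternative
-- what changed: A's single stateful scan with a direction state machine and an early break is replaced by building an explicit list of pairwise comparison signs and three separate scans over it: first nonzero sign gives the direction, first opposite sign gives the break point, and the last in-direction index before the break gives klast.
import Mathlib
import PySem

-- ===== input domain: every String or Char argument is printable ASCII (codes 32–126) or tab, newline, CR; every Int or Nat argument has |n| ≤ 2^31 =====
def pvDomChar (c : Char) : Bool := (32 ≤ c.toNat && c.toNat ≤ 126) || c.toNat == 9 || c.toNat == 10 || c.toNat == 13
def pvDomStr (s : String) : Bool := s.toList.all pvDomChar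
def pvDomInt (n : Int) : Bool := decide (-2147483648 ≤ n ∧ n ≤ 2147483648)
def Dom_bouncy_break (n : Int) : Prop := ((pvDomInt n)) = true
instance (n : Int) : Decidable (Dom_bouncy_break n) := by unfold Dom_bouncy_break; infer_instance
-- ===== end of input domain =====

-- B replaces A's single stateful scan by an explicit pairwise-sign table and three
-- separate index scans over it (alternative decomposition, same linear cost).

-- ===== PORT A =====
-- the for-loop of A, with state (clast, klast, k, direction); `break` = early return
def bbLoopA : List Char → Char → Int → Int → Int → Int × Int
  | [], _, klast, _, direction => (klast, direction)
  | c :: rest, clast, klast, k, direction =>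
    if direction == 1 then
      if c < clast then (klast, direction)
      else bbLoopA rest c (if c > clast then k else klast) (k + 1) direction
    else if direction == -1 then
      if c > clast then (klast, direction)
      else bbLoopA rest c (if c < clast then k else klast) (k + 1) direction
    else
      let direction1 := if c > clast then 1 else direction
      let klast1 := if c > clast then k else klast
      let direction2 := if c < clast then -1 else direction1
      let klast2 := if c < clast then k else klast1
      bbLoopA rest c klast2 (k + 1) direction2

def bouncy_break (n : Int) : Int × Int × String :=
  let s := PySem.Int.toStr n
  match s.toList with
  | [] => (-1, 0, s)   -- unreachable: str(n) is never empty
  | c0 :: rest =>      -- c0 = s[0], rest = s[1:]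
    let (klast, direction) := bbLoopA rest c0 (-1) 1 0
    (klast, direction, s)

-- ===== PORT B =====
def bbSign (a b : Char) : Int := (if b > a then 1 else 0) - (if b < a then 1 else 0)

def bbFirstNonzero : List Int → Int
  | [] => 0
  | x :: r => if x ≠ 0 then x else bbFirstNonzero r

def bbFirstIndex : List Int → Int → Nat
  | [], _ => 0
  | x :: r, t => if x == t then 0 else bbFirstIndex r t + 1

def bbLastMatchIndex : List Int → Int → Int → Int → Int
  | [], _, _, klast => klast
  | x :: r, t, i, klast => bbLastMatchIndex r t (i + 1) (if x == t then i else klast)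

def bouncy_break_alt (n : Int) : Int × Int × String :=
  let s := PySem.Int.toStr n
  let cs := s.toList
  let d := List.zipWith bbSign cs cs.tail
  let direction := bbFirstNonzero d
  let stop := if direction ≠ 0 then bbFirstIndex d (-direction) else 0
  let klast := bbLastMatchIndex (d.take stop) direction 1 (-1)
  (klast, direction, s)

-- ===== PRECONDITION & SPEC =====
def Spec_bouncy_break (n : Int) (out : Int × Int × String) : Prop := out = bouncy_break_alt n
instance (n : Int) (out : Int × Int × String) : Decidable (Spec_bouncy_break n out) := by unfold Spec_bouncy_break; infer_instance

-- ===== CLAIM (what is proved, stated in full; the proofs are below) =====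
def Claim_equal_bouncy_break : Prop := ∀ (n : Int), Dom_bouncy_break n → Spec_bouncy_break n (bouncy_break n)

-- ===== LEMMAS AND PROOFS =====

-- In a fixed direction `dir` (±1), the loop returns the last in-direction index
-- before the first opposite sign.
theorem bbLoopA_dir (dir : Int) (hdir : dir = 1 ∨ dir = -1) :
    ∀ (cs : List Char) (c0 : Char) (klast k : Int),
      bbLoopA cs c0 klast k dir =
        (bbLastMatchIndex
            ((List.zipWith bbSign (c0 :: cs) cs).take
              (bbFirstIndex (List.zipWith bbSign (c0 :: cs) cs) (-dir)))
            dir k klast, dir) := by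
  intro cs
  induction cs with
  | nil =>
    intro c0 klast k
    rcases hdir with h | h <;> subst h <;> simp [bbLoopA, bbFirstIndex, bbLastMatchIndex]
  | cons c r ih =>
    intro c0 klast k
    rcases hdir with h | h <;> subst h
    · rcases lt_trichotomy c c0 with hlt | heq | hgt
      · have h1 : ¬ c0 < c := lt_asymm hlt
        simp [bbLoopA, hlt, h1, bbSign, bbFirstIndex, bbLastMatchIndex]
      · subst heq
        simp only [bbLoopA, lt_irrefl, if_false]
        rw [ih]
        simp [bbSign, bbFirstIndex, bbLastMatchIndex]
      · have h1 : ¬ c < c0 := lt_asymm hgt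
        simp only [bbLoopA, h1, hgt, if_false, if_true]
        rw [ih]
        simp [bbSign, hgt, h1, bbFirstIndex, bbLastMatchIndex]
    · rcases lt_trichotomy c c0 with hlt | heq | hgt
      · have h1 : ¬ c0 < c := lt_asymm hlt
        simp only [bbLoopA, h1, hlt, if_false, if_true]
        rw [ih]
        simp [bbSign, hlt, h1, bbFirstIndex, bbLastMatchIndex]
      · subst heq
        simp only [bbLoopA, lt_irrefl, if_false]
        rw [ih]
        simp [bbSign, bbFirstIndex, bbLastMatchIndex]
      · have h1 : ¬ c < c0 := lt_asymm hgt
        simp [bbLoopA, hgt, h1, bbSign, bbFirstIndex, bbLastMatchIndex]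

-- Phase 0 (direction not yet set): the loop equals B's three scans over the sign table.
theorem bbLoopA_zero :
    ∀ (cs : List Char) (c0 : Char) (k : Int),
      bbLoopA cs c0 (-1) k 0 =
        (let d := List.zipWith bbSign (c0 :: cs) cs
         let dir := bbFirstNonzero d
         let stop := if dir ≠ 0 then bbFirstIndex d (-dir) else 0
         (bbLastMatchIndex (d.take stop) dir k (-1), dir)) := by
  intro cs
  induction cs with
  | nil =>
    intro c0 k
    simp [bbLoopA, bbFirstNonzero, bbLastMatchIndex]
  | cons c r ih =>
    intro c0 k
    rcases lt_trichotomy c c0 with hlt | heq | hgt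
    · have h1 : ¬ c0 < c := lt_asymm hlt
      simp only [bbLoopA, h1, hlt, if_false, if_true]
      rw [bbLoopA_dir (-1) (Or.inr rfl)]
      simp [bbSign, hlt, h1, bbFirstNonzero, bbFirstIndex, bbLastMatchIndex]
    · subst heq
      simp only [bbLoopA, lt_irrefl, if_false]
      rw [ih]
      have hs : bbSign c c = 0 := by simp [bbSign]
      simp only [List.zipWith_cons_cons, hs]
      by_cases h0 : bbFirstNonzero (List.zipWith bbSign (c :: r) r) = 0
      · simp [bbFirstNonzero, h0, bbLastMatchIndex]
      · have hne : -bbFirstNonzero (List.zipWith bbSign (c :: r) r) ≠ 0 := by omega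
        have h0' : (0 : Int) ≠ bbFirstNonzero (List.zipWith bbSign (c :: r) r) :=
          fun hh => h0 hh.symm
        simp [bbFirstNonzero, h0, bbFirstIndex, Ne.symm hne, h0', bbLastMatchIndex,
          List.take_succ_cons]
    · have h1 : ¬ c < c0 := lt_asymm hgt
      simp only [bbLoopA, h1, hgt, if_false, if_true]
      rw [bbLoopA_dir 1 (Or.inl rfl)]
      simp [bbSign, hgt, h1, bbFirstNonzero, bbFirstIndex, bbLastMatchIndex]

-- ===== VERDICT (by name: the statement is the Claim_ definition above) =====
theorem bouncy_break_spec : Claim_equal_bouncy_break := by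
  intro n _
  unfold Spec_bouncy_break bouncy_break bouncy_break_alt
  dsimp only
  rw [PySem.Int.toList_toStr]
  generalize PySem.Int.toChars n = cs
  cases cs with
  | nil => simp [bbFirstNonzero, bbLastMatchIndex]
  | cons c0 rest =>
    simp only [List.tail_cons]
    rw [bbLoopA_zero]
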